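-- pv_equiv track=rewrite | github.com/Polyzoa/polyzoa-dagihouse-hackathon | extract/service.py | get_address_files
-- ===== SOURCE A (Python) =====
-- def get_address_files(file_names: list[str]) -> dict[str, list[str]]:
--     address_files = {}
--     for name in file_names:
--         paths = str.split(name, "/")
--         address = "/".join(paths[0:2])
--         if address not in address_files:
--             address_files[address] = []
--         address_files[address] = [*address_files[address], name]
--     return address_files
-- ===== SOURCE B (Python) =====
-- def get_address_files(file_names: list[str]) -> dict[str, list[str]]:
--     def addr(name):
--         return "/".join(name.split("/")[0:2])
--     seen = set()
--     keys = []
--     for name in file_names: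
--         a = addr(name)
--         if a not in seen:
--             seen.add(a)
--             keys.append(a)
--     return {k: [n for n in file_names if addr(n) == k] for k in keys}
-- ===== Notes on version B (the rewrite author's own statement) =====
-- stated objective: alternative
-- what changed: Replaces A's single accumulating dict-building pass with a two-phase shape: one pass collects the distinct addresses in first-appearance order, then each group is produced by a separate filtering scan over file_names.
import Mathlib
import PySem

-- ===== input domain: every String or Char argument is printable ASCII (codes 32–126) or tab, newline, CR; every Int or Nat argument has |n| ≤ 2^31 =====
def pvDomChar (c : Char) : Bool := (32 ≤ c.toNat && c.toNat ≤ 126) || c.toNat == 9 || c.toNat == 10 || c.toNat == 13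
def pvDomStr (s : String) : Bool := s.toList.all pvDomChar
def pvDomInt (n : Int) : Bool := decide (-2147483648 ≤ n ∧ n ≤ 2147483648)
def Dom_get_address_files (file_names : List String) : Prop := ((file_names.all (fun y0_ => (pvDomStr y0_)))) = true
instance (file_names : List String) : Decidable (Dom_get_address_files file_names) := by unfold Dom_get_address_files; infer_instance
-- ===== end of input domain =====

-- B replaces A's single accumulating dict pass with "collect distinct addresses, then one filtering scan per address": a different, two-phase decomposition of the same grouping.


-- address = "/".join(name.split("/")[0:2])  (same two lines in A and B)
def pvAddr (name : String) : String :=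
  PySem.Str.join "/" (PySem.List.slice ((PySem.Str.split? name "/").getD []) (some 0) (some 2))

-- ===== PORT A =====
def get_address_files (file_names : List String) : List (String × List String) :=
  (file_names.foldl
    (fun (d : PySem.Dict String (List String)) name =>
      let address := pvAddr name
      let d := if d.contains address then d else d.insert address []
      d.insert address (d.getD address [] ++ [name]))
    PySem.Dict.empty).items

-- ===== PORT B =====
-- phase 1: distinct addresses in first-appearance order (seen-set + key list)
def pvKeys (file_names : List String) : PySem.Set String × List String :=
  file_names.foldl
    (fun (p : PySem.Set String × List String) name =>
      let a := pvAddr name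
      if PySem.Set.contains p.1 a then p else (PySem.Set.add p.1 a, p.2 ++ [a]))
    (PySem.Set.empty, [])

-- phase 2: one filtering scan per address
def get_address_files_alt (file_names : List String) : List (String × List String) :=
  (pvKeys file_names).2.map (fun k => (k, file_names.filter (fun n => pvAddr n == k)))

-- ===== PRECONDITION & SPEC =====
def Spec_get_address_files (file_names : List String) (out : List (String × List String)) : Prop := out = get_address_files_alt file_names
instance (file_names : List String) (out : List (String × List String)) : Decidable (Spec_get_address_files file_names out) := by unfold Spec_get_address_files; infer_instance

-- ===== CLAIM (what is proved, stated in full; the proofs are below) =====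
def Claim_equal_get_address_files : Prop := ∀ (file_names : List String), Dom_get_address_files file_names → Spec_get_address_files file_names (get_address_files file_names)

-- ===== LEMMAS AND PROOFS =====

-- The A-side fold, named for the proofs
def pvAFold (xs : List String) : PySem.Dict String (List String) :=
  xs.foldl
    (fun (d : PySem.Dict String (List String)) name =>
      let address := pvAddr name
      let d := if d.contains address then d else d.insert address []
      d.insert address (d.getD address [] ++ [name]))
    PySem.Dict.empty

-- Combined invariant, proved by snoc induction
theorem pv_invariant (xs : List String) :
    (pvKeys xs).1 = ((pvKeys xs).2 : List String)
    ∧ (pvKeys xs).2.Nodup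
    ∧ (∀ k, k ∈ (pvKeys xs).2 ↔ k ∈ xs.map pvAddr)
    ∧ (pvAFold xs).items
        = (pvKeys xs).2.map (fun k => (k, xs.filter (fun n => pvAddr n == k))) := by
  induction xs using List.reverseRecOn with
  | nil =>
      exact ⟨rfl, by simp [pvKeys], by simp [pvKeys], by simp [pvKeys, pvAFold, PySem.Dict.empty]⟩
  | append_singleton xs n ih =>
      obtain ⟨hseen, hnd, hmem, hitems⟩ := ih
      have hKstep : pvKeys (xs ++ [n]) =
          (if PySem.Set.contains (pvKeys xs).1 (pvAddr n) then pvKeys xs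
           else (PySem.Set.add (pvKeys xs).1 (pvAddr n), (pvKeys xs).2 ++ [pvAddr n])) := by
        simp [pvKeys, List.foldl_append]
      have hAstep : pvAFold (xs ++ [n]) =
          (let d := pvAFold xs
           let address := pvAddr n
           let d := if d.contains address then d else d.insert address []
           d.insert address (d.getD address [] ++ [n])) := by
        simp [pvAFold, List.foldl_append]
      have hkeys : (pvAFold xs).keys = (pvKeys xs).2 := by
        simp only [PySem.Dict.keys, hitems, List.map_map]
        simp [Function.comp_def]
      by_cases hc : pvAddr n ∈ (pvKeys xs).2
      · -- address already seen
        have hcontS : PySem.Set.contains (pvKeys xs).1 (pvAddr n) = true := by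
          rw [hseen]; exact (PySem.Set.contains_iff _ _).mpr hc
        have hK : pvKeys (xs ++ [n]) = pvKeys xs := by rw [hKstep, if_pos hcontS]
        have hcontD : (pvAFold xs).contains (pvAddr n) = true := by
          rw [PySem.Dict.contains_iff_mem_keys, hkeys]; exact hc
        have hndk : (pvAFold xs).keys.Nodup := by rw [hkeys]; exact hnd
        have hmemI : (pvAddr n, xs.filter (fun m => pvAddr m == pvAddr n)) ∈ (pvAFold xs).items := by
          rw [hitems]
          exact List.mem_map.mpr ⟨pvAddr n, hc, rfl⟩
        have hget : (pvAFold xs).getD (pvAddr n) [] = xs.filter (fun m => pvAddr m == pvAddr n) :=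
          PySem.Dict.getD_of_mem_items _ hmemI hndk []
        refine ⟨by rw [hK]; exact hseen, by rw [hK]; exact hnd, ?_, ?_⟩
        · intro k; rw [hK]
          constructor
          · intro h; rw [List.map_append]; exact List.mem_append_left _ ((hmem k).mp h)
          · intro h
            rw [List.map_append, List.mem_append] at h
            rcases h with h' | h'
            · exact (hmem k).mpr h'
            · rw [List.map_cons, List.map_nil, List.mem_singleton] at h'
              subst h'; exact hc
        · rw [hAstep, hK]
          simp only [hcontD, if_true]
          rw [PySem.Dict.items_insert_of_contains _ _ hcontD, hget, hitems, List.map_map]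
          apply List.map_congr_left
          intro k _
          by_cases hk : k = pvAddr n
          · subst hk
            simp [List.filter_append]
          · have h1 : (k == pvAddr n) = false := beq_eq_false_iff_ne.mpr hk
            have h2 : (pvAddr n == k) = false := beq_eq_false_iff_ne.mpr (Ne.symm hk)
            simp only [Function.comp_apply, h1, Bool.false_eq_true, if_false, List.filter_append]
            simp [h2]
      · -- fresh address
        have hnotmemS : pvAddr n ∉ (pvKeys xs).1 := by rw [hseen]; exact hc
        have hK : pvKeys (xs ++ [n]) =
            (PySem.Set.add (pvKeys xs).1 (pvAddr n), (pvKeys xs).2 ++ [pvAddr n]) := by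
          rw [hKstep, if_neg (by simpa using hnotmemS)]
        have hcontD : (pvAFold xs).contains (pvAddr n) = false := by
          by_contra h
          have h' : (pvAFold xs).contains (pvAddr n) = true := by simpa using h
          have := (PySem.Dict.contains_iff_mem_keys _ _).mp h'
          rw [hkeys] at this
          exact hc this
        have hfresh : xs.filter (fun m => pvAddr m == pvAddr n) = [] := by
          rw [List.filter_eq_nil_iff]
          intro m hm hbeq
          have heq : pvAddr m = pvAddr n := by simpa using hbeq
          exact hc ((hmem (pvAddr n)).mpr (heq ▸ List.mem_map.mpr ⟨m, hm, rfl⟩))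
        refine ⟨?_, ?_, ?_, ?_⟩
        · rw [hK]
          show PySem.Set.add (pvKeys xs).1 (pvAddr n) = (pvKeys xs).2 ++ [pvAddr n]
          rw [PySem.Set.add_of_not_mem hnotmemS, hseen]
        · rw [hK]
          show ((pvKeys xs).2 ++ [pvAddr n]).Nodup
          refine List.nodup_append.mpr ⟨hnd, List.nodup_singleton _, ?_⟩
          intro x hx y hy
          rw [List.mem_singleton] at hy
          subst hy
          exact fun h => hc (h ▸ hx)
        · intro k; rw [hK]
          show k ∈ (pvKeys xs).2 ++ [pvAddr n] ↔ k ∈ List.map pvAddr (xs ++ [n])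
          rw [List.map_append, List.mem_append, List.mem_append, hmem k]
          simp
        · rw [hAstep, hK]
          simp only [hcontD, Bool.false_eq_true, if_false]
          rw [PySem.Dict.getD_insert_self (pvAFold xs) (pvAddr n) [] [],
            PySem.Dict.items_insert_of_contains ((pvAFold xs).insert (pvAddr n) []) ([] ++ [n])
              (PySem.Dict.contains_insert_self (pvAFold xs) (pvAddr n) []),
            PySem.Dict.items_insert_of_not_contains _ _ hcontD, hitems]
          show (List.map (fun k => (k, xs.filter (fun n => pvAddr n == k))) (pvKeys xs).2
                  ++ [(pvAddr n, ([] : List String))]).map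
                 (fun p => if (p.1 == pvAddr n) = true then (pvAddr n, [] ++ [n]) else p)
              = ((pvKeys xs).2 ++ [pvAddr n]).map
                  (fun k => (k, (xs ++ [n]).filter (fun m => pvAddr m == k)))
          rw [List.map_append, List.map_append, List.map_map]
          refine congrArg₂ (· ++ ·) ?_ ?_
          · apply List.map_congr_left
            intro k hkmem
            have hk : k ≠ pvAddr n := fun h => hc (h ▸ hkmem)
            have h1 : (k == pvAddr n) = false := beq_eq_false_iff_ne.mpr hk
            have h2 : (pvAddr n == k) = false := beq_eq_false_iff_ne.mpr (Ne.symm hk)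
            simp only [Function.comp_apply, h1, Bool.false_eq_true, if_false, List.filter_append]
            simp [h2]
          · simp [List.filter_append, hfresh]

-- ===== VERDICT (by name: the statement is the Claim_ definition above) =====
theorem get_address_files_spec : Claim_equal_get_address_files := by
  intro file_names _
  unfold Spec_get_address_files get_address_files get_address_files_alt
  exact (pv_invariant file_names).2.2.2
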